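-- pv_equiv track=rewrite | github.com/connor-git-yaml/OctoAgent | octoagent/apps/gateway/src/octoagent/gateway/routes/chat.py | _parse_projected_session_ref
-- ===== SOURCE A (Python) =====
-- def _parse_projected_session_ref(session_id: str) -> tuple[str, str, str]:
--     thread_id = ""
--     project_id = ""
--     workspace_id = ""
--     for segment in str(session_id or "").split("|"):
--         normalized = segment.strip()
--         if normalized.startswith("thread:") and not thread_id:
--             thread_id = normalized.removeprefix("thread:").strip()
--         elif normalized.startswith("project:") and not project_id:
--             project_id = normalized.removeprefix("project:").strip()
--         elif normalized.startswith("workspace:") and not workspace_id: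
--             workspace_id = normalized.removeprefix("workspace:").strip()
--     return thread_id, project_id, workspace_id
-- ===== SOURCE B (Python) =====
-- def _parse_projected_session_ref(session_id: str) -> tuple[str, str, str]:
--     segments = [s.strip() for s in str(session_id or "").split("|")]
--
--     def find(prefix: str) -> str:
--         for seg in segments:
--             if seg.startswith(prefix):
--                 value = seg[len(prefix):].strip()
--                 if value:
--                     return value
--         return ""
--
--     return find("thread:"), find("project:"), find("workspace:")
-- ===== Notes on version B (the rewrite author's own statement) =====
-- stated objective: simpler
-- what changed: Replaces A's single stateful pass with three mutable not-yet-set guards by one strip/split pass plus an independent helper find(prefix) that returns the first non-empty value for each of the three prefixes.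
import Mathlib
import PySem

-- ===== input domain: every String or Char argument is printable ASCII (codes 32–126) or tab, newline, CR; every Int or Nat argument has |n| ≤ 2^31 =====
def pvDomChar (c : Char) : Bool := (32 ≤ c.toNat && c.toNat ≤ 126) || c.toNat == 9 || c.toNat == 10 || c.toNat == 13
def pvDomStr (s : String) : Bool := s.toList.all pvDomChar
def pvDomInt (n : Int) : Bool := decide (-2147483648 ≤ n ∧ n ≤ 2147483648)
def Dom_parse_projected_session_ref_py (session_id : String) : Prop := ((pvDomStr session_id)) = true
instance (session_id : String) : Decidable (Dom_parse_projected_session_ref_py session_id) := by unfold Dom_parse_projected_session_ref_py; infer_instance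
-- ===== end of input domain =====

-- B replaces A's single stateful pass (mutable not-yet-set guards) by three independent
-- first-non-empty-match scans over the stripped segments; objective: simpler.

-- ===== PORT A =====
-- one loop step of A's for-loop over the split segments (state = (thread_id, project_id, workspace_id));
-- 'normalized.removeprefix(p).strip()' is ported by hand as strip of drop p.length (exact, since
-- it is only taken when startswith p holds)
def pvStepA (st : String × String × String) (segment : String) : String × String × String :=
  let n := PySem.Str.strip segment
  if PySem.Str.startswith n "thread:" && (st.1 == "") then
    (PySem.Str.strip (String.ofList (n.toList.drop 7)), st.2.1, st.2.2)
  else if PySem.Str.startswith n "project:" && (st.2.1 == "") then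
    (st.1, PySem.Str.strip (String.ofList (n.toList.drop 8)), st.2.2)
  else if PySem.Str.startswith n "workspace:" && (st.2.2 == "") then
    (st.1, st.2.1, PySem.Str.strip (String.ofList (n.toList.drop 10)))
  else st

def parse_projected_session_ref_py (session_id : String) : String × String × String :=
  -- str(session_id or "") is session_id itself for a str argument ('' stays '')
  ((PySem.Str.split? session_id "|").getD []).foldl pvStepA ("", "", "")

-- ===== PORT B =====
-- find(prefix): first segment starting with prefix whose remainder strips to non-empty
def pvFind (pre : String) : List String → String
  | [] => ""
  | seg :: rest =>
    if PySem.Str.startswith seg pre then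
      let value := PySem.Str.strip (String.ofList (seg.toList.drop pre.length))
      if value ≠ "" then value else pvFind pre rest
    else pvFind pre rest

def parse_projected_session_ref_py_alt (session_id : String) : String × String × String :=
  let segments := ((PySem.Str.split? session_id "|").getD []).map PySem.Str.strip
  (pvFind "thread:" segments, pvFind "project:" segments, pvFind "workspace:" segments)

-- ===== PRECONDITION & SPEC =====
def Spec_parse_projected_session_ref_py (session_id : String) (out : String × String × String) : Prop := out = parse_projected_session_ref_py_alt session_id
instance (session_id : String) (out : String × String × String) : Decidable (Spec_parse_projected_session_ref_py session_id out) := by unfold Spec_parse_projected_session_ref_py; infer_instance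

-- ===== CLAIM (what is proved, stated in full; the proofs are below) =====
def Claim_equal_parse_projected_session_ref_py : Prop := ∀ (session_id : String), Dom_parse_projected_session_ref_py session_id → Spec_parse_projected_session_ref_py session_id (parse_projected_session_ref_py session_id)

-- ===== LEMMAS AND PROOFS =====

-- A's accumulator component, expressed via B's find: once set it stays, else find over the rest
def pvAux (pre acc : String) (l : List String) : String :=
  if acc = "" then pvFind pre (l.map PySem.Str.strip) else acc

-- the three prefixes are pairwise non-overlapping (different first character)
theorem pvHead {s a : String} {c : Char} (hc : a.toList.head? = some c)
    (ha : PySem.Str.startswith s a = true) : s.toList.head? = some c := by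
  have ha' := (PySem.Chars.startswith_iff _ _).1 (by simpa using ha)
  rcases ha' with ⟨r, hr⟩
  rw [← hr, List.head?_append, hc]
  rfl

theorem pvDisj {s a b : String} {c d : Char} (hc : a.toList.head? = some c)
    (hd : b.toList.head? = some d) (hcd : c ≠ d)
    (ha : PySem.Str.startswith s a = true) : PySem.Str.startswith s b = false := by
  by_contra h
  have hb : PySem.Str.startswith s b = true := by
    cases hx : PySem.Str.startswith s b
    · exact absurd hx h
    · rfl
  have h1 := pvHead hc ha
  have h2 := pvHead hd hb
  rw [h1] at h2
  exact hcd (Option.some.inj h2)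

theorem pvAux_nil (pre acc : String) : pvAux pre acc [] = acc := by
  unfold pvAux pvFind
  split <;> simp_all

theorem pvFind_cons (pre seg : String) (l : List String) :
    pvFind pre (seg :: l) =
      if PySem.Str.startswith seg pre = true then
        (if PySem.Str.strip (String.ofList (seg.toList.drop pre.length)) ≠ "" then
           PySem.Str.strip (String.ofList (seg.toList.drop pre.length))
         else pvFind pre l)
      else pvFind pre l := rfl

theorem pvAux_cons {acc' : String} (pre acc : String) (seg : String) (l : List String)
    (hset : PySem.Str.startswith (PySem.Str.strip seg) pre = true → acc = "" →
      acc' = PySem.Str.strip (String.ofList ((PySem.Str.strip seg).toList.drop pre.length)))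
    (hskip : (PySem.Str.startswith (PySem.Str.strip seg) pre = false ∨ acc ≠ "") → acc' = acc) :
    pvAux pre acc (seg :: l) = pvAux pre acc' l := by
  by_cases hacc : acc = ""
  · cases hsw : PySem.Str.startswith (PySem.Str.strip seg) pre
    · rw [hskip (Or.inl hsw)]
      unfold pvAux
      rw [if_pos hacc, if_pos hacc, List.map_cons, pvFind_cons, if_neg (by simp only [hsw]; decide)]
    · have hval := hset hsw hacc
      unfold pvAux
      rw [if_pos hacc, List.map_cons, pvFind_cons, if_pos hsw]
      by_cases hv : PySem.Str.strip (String.ofList ((PySem.Str.strip seg).toList.drop pre.length)) = ""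
      · rw [if_neg (not_not_intro hv), if_pos (hval.trans hv)]
      · rw [if_pos hv, if_neg (fun h => hv (hval ▸ h))]
        exact hval.symm
  · rw [hskip (Or.inr hacc)]
    unfold pvAux
    rw [if_neg hacc, if_neg hacc]

set_option maxHeartbeats 1000000 in
theorem pvCore (l : List String) (t p w : String) :
    l.foldl pvStepA (t, p, w) =
      (pvAux "thread:" t l, pvAux "project:" p l, pvAux "workspace:" w l) := by
  induction l generalizing t p w with
  | nil => simp [pvAux_nil]
  | cons seg rest ih =>
    rw [List.foldl_cons]
    simp only [pvStepA]
    set n := PySem.Str.strip seg with hn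
    cases hc1 : (PySem.Str.startswith n "thread:" && (t == "")) with
    | true =>
      have h1 : PySem.Str.startswith n "thread:" = true ∧ t = "" := by
        simpa using hc1
      rw [if_pos rfl, ih]
      have hnp : PySem.Str.startswith n "project:" = false :=
        pvDisj (a := "thread:") (c := 't') (d := 'p') rfl rfl (by decide) h1.1
      have hnw : PySem.Str.startswith n "workspace:" = false :=
        pvDisj (a := "thread:") (c := 't') (d := 'w') rfl rfl (by decide) h1.1
      simp only [Prod.mk.injEq]
      refine ⟨?_, ?_, ?_⟩
      · exact (pvAux_cons _ _ _ _ (fun _ _ => by rw [← hn]; rfl) (fun hor => by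
          rcases hor with h | h
          · rw [← hn, h1.1] at h; cases h
          · exact absurd h1.2 h)).symm
      · exact (pvAux_cons _ _ _ _ (fun hsw _ => by rw [← hn, hnp] at hsw; cases hsw)
          (fun _ => rfl)).symm
      · exact (pvAux_cons _ _ _ _ (fun hsw _ => by rw [← hn, hnw] at hsw; cases hsw)
          (fun _ => rfl)).symm
    | false =>
      have ht : PySem.Str.startswith n "thread:" = false ∨ t ≠ "" := by
        cases hx : PySem.Str.startswith n "thread:" with
        | false => exact Or.inl rfl
        | true => exact Or.inr (fun he => by rw [hx, he] at hc1; simp at hc1)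
      rw [if_neg (by decide)]
      cases hc2 : (PySem.Str.startswith n "project:" && (p == "")) with
      | true =>
        have h2 : PySem.Str.startswith n "project:" = true ∧ p = "" := by
          simpa using hc2
        rw [if_pos rfl, ih]
        have hnt : PySem.Str.startswith n "thread:" = false :=
          pvDisj (a := "project:") (c := 'p') (d := 't') rfl rfl (by decide) h2.1
        have hnw : PySem.Str.startswith n "workspace:" = false :=
          pvDisj (a := "project:") (c := 'p') (d := 'w') rfl rfl (by decide) h2.1
        simp only [Prod.mk.injEq]
        refine ⟨?_, ?_, ?_⟩
        · exact (pvAux_cons _ _ _ _ (fun hsw _ => by rw [← hn, hnt] at hsw; cases hsw)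
            (fun _ => rfl)).symm
        · exact (pvAux_cons _ _ _ _ (fun _ _ => by rw [← hn]; rfl) (fun hor => by
            rcases hor with h | h
            · rw [← hn, h2.1] at h; cases h
            · exact absurd h2.2 h)).symm
        · exact (pvAux_cons _ _ _ _ (fun hsw _ => by rw [← hn, hnw] at hsw; cases hsw)
            (fun _ => rfl)).symm
      | false =>
        have hp : PySem.Str.startswith n "project:" = false ∨ p ≠ "" := by
          cases hx : PySem.Str.startswith n "project:" with
          | false => exact Or.inl rfl
          | true => exact Or.inr (fun he => by rw [hx, he] at hc2; simp at hc2)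
        rw [if_neg (by decide)]
        cases hc3 : (PySem.Str.startswith n "workspace:" && (w == "")) with
        | true =>
          have h3 : PySem.Str.startswith n "workspace:" = true ∧ w = "" := by
            simpa using hc3
          rw [if_pos rfl, ih]
          have hnt : PySem.Str.startswith n "thread:" = false :=
            pvDisj (a := "workspace:") (c := 'w') (d := 't') rfl rfl (by decide) h3.1
          have hnp : PySem.Str.startswith n "project:" = false :=
            pvDisj (a := "workspace:") (c := 'w') (d := 'p') rfl rfl (by decide) h3.1
          simp only [Prod.mk.injEq]
          refine ⟨?_, ?_, ?_⟩
          · exact (pvAux_cons _ _ _ _ (fun hsw _ => by rw [← hn, hnt] at hsw; cases hsw)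
              (fun _ => rfl)).symm
          · exact (pvAux_cons _ _ _ _ (fun hsw _ => by rw [← hn, hnp] at hsw; cases hsw)
              (fun _ => rfl)).symm
          · exact (pvAux_cons _ _ _ _ (fun _ _ => by rw [← hn]; rfl) (fun hor => by
              rcases hor with h | h
              · rw [← hn, h3.1] at h; cases h
              · exact absurd h3.2 h)).symm
        | false =>
          have hw : PySem.Str.startswith n "workspace:" = false ∨ w ≠ "" := by
            cases hx : PySem.Str.startswith n "workspace:" with
            | false => exact Or.inl rfl
            | true => exact Or.inr (fun he => by rw [hx, he] at hc3; simp at hc3)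
          rw [if_neg (by decide), ih]
          simp only [Prod.mk.injEq]
          refine ⟨?_, ?_, ?_⟩
          · exact (pvAux_cons _ _ _ _
              (fun hsw hte => by rw [← hn] at hsw
                                 rcases ht with h | h
                                 · rw [hsw] at h; cases h
                                 · exact absurd hte h)
              (fun _ => rfl)).symm
          · exact (pvAux_cons _ _ _ _
              (fun hsw hpe => by rw [← hn] at hsw
                                 rcases hp with h | h
                                 · rw [hsw] at h; cases h
                                 · exact absurd hpe h)
              (fun _ => rfl)).symm
          · exact (pvAux_cons _ _ _ _
              (fun hsw hwe => by rw [← hn] at hsw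
                                 rcases hw with h | h
                                 · rw [hsw] at h; cases h
                                 · exact absurd hwe h)
              (fun _ => rfl)).symm

-- ===== VERDICT (by name: the statement is the Claim_ definition above) =====
theorem parse_projected_session_ref_py_spec : Claim_equal_parse_projected_session_ref_py := by
  intro s _
  show _ = _
  rw [parse_projected_session_ref_py, pvCore]
  rfl
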